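-- pv_equiv track=rewrite | github.com/iamdavehawkins/spotify_playlist_updater_script | spotipy_utils.py | deduplicate_track_list
-- ===== SOURCE A (Python) =====
-- from typing import Dict, List, Optional, Tuple, Any
--
-- def deduplicate_track_list(tracks: List[Tuple[str, str, str, Optional[str], Optional[str]]]) -> List[Tuple[str, str, str, Optional[str], Optional[str]]]:
--     """Remove duplicate tracks, keeping only the most recent version of each track.
--
--     Args:
--         tracks: A list of track tuples where each tuple contains:
--                (track_id, name, release_date, artist_threads, artist_name)
--
--     Returns:
--         A list of unique tracks sorted by release date (oldest to newest).
--         When multiple versions of a track exist, only the most recent is kept.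
--     """
--     # Dictionary to store the most recent release for each track name
--     track_dict = {}
--
--     for track in tracks:
--         if len(track) < 5:
--             # Skip malformed track data
--             continue
--
--         track_id, name, release_date, artist, album = track
--         # If the track is not in the dictionary or the new date is more recent, update it
--         if name not in track_dict or release_date > track_dict[name][2]:
--             track_dict[name] = track
--
--     # Extract the values from the dictionary and convert them back to a list
--     unique_tracks = list(track_dict.values())
--
--     # Sort by release date for clarity (oldest first)
--     unique_tracks.sort(key=lambda x: x[2])
--
--     return unique_tracks
-- ===== SOURCE B (Python) =====
-- def deduplicate_track_list(tracks):
--     """Bucket-then-pick: group rows by name (first-appearance order), pick the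
--     first-maximal release date per name with max(), then sort by date."""
--     rows = [t for t in tracks if len(t) >= 5]
--     names = list(dict.fromkeys(t[1] for t in rows))
--     winners = [max((t for t in rows if t[1] == name), key=lambda t: t[2])
--                for name in names]
--     winners.sort(key=lambda x: x[2])
--     return winners
-- ===== Notes on version B (the rewrite author's own statement) =====
-- stated objective: alternative
-- what changed: Replaced A's single running-best dict fold by a two-phase decomposition: dedup the names in first-appearance order, then pick each name's winner as the first-maximal release date with max() over that name's rows, then sort by date.
import Mathlib
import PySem

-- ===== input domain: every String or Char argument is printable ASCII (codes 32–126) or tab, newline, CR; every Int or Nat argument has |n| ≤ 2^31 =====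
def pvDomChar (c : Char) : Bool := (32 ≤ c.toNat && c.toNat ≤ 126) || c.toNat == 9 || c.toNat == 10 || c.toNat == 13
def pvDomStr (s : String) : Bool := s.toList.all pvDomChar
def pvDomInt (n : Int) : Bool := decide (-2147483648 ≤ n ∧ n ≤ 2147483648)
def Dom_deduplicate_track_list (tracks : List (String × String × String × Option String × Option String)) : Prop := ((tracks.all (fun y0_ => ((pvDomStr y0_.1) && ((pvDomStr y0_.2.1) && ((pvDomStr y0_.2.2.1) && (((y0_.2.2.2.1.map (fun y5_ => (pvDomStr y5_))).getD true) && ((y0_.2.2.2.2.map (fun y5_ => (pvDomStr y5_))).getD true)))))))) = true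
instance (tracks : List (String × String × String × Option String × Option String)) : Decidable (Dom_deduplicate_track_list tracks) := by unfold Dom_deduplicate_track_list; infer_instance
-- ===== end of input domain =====

-- B replaces A's running-best dict fold by dedup-names / pick-first-max-per-name / sort (alternative decomposition, same results).

abbrev PvT := String × String × String × Option String × Option String

-- ===== PORT A =====
-- the loop body of A's `for track in tracks:`; the `len(track) < 5: continue` guard never
-- fires here because a Lean tuple of this type always has the 5 components, so it is omitted;
-- Python's short-circuit `name not in track_dict or release_date > track_dict[name][2]`
-- is `!contains || decide (stored < new)` with a dummy default that is only read when contains is true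
def pvStepA (d : PySem.Dict String PvT) (track : PvT) : PySem.Dict String PvT :=
  if !(d.contains track.2.1) || decide ((d.getD track.2.1 track).2.2.1 < track.2.2.1) then
    d.insert track.2.1 track
  else d

def deduplicate_track_list (tracks : List (String × String × String × Option String × Option String)) : List (String × String × String × Option String × Option String) :=
  let track_dict := tracks.foldl pvStepA PySem.Dict.empty
  let unique_tracks := track_dict.values
  PySem.List.sorted unique_tracks (fun x => x.2.2.1) false

-- ===== PORT B =====
-- rows = [t for t in tracks if len(t) >= 5] keeps every tuple here (all are statically 5-long);
-- the per-name `max(...)` is PySem.List.max? (first maximal element, like Python's max);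
-- filterMap is the comprehension: the bucket of a name drawn from rows is never empty, so max? is never none
def deduplicate_track_list_alt (tracks : List (String × String × String × Option String × Option String)) : List (String × String × String × Option String × Option String) :=
  let rows := tracks
  let names := PySem.List.dedup (rows.map (fun t => t.2.1))
  let winners := names.filterMap (fun name =>
      PySem.List.max? (rows.filter (fun t => t.2.1 == name)) (fun t => t.2.2.1))
  PySem.List.sorted winners (fun x => x.2.2.1) false

-- ===== PRECONDITION & SPEC =====
def Spec_deduplicate_track_list (tracks : List (String × String × String × Option String × Option String)) (out : List (String × String × String × Option String × Option String)) : Prop := out = deduplicate_track_list_alt tracks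
instance (tracks : List (String × String × String × Option String × Option String)) (out : List (String × String × String × Option String × Option String)) : Decidable (Spec_deduplicate_track_list tracks out) := by unfold Spec_deduplicate_track_list; infer_instance

-- ===== CLAIM (what is proved, stated in full; the proofs are below) =====
def Claim_equal_deduplicate_track_list : Prop := ∀ (tracks : List (String × String × String × Option String × Option String)), Dom_deduplicate_track_list tracks → Spec_deduplicate_track_list tracks (deduplicate_track_list tracks)

-- ===== LEMMAS AND PROOFS =====

def pvJunk : PvT := ("", "", "", none, none)

def pvBucket (l : List PvT) (name : String) : List PvT := l.filter (fun t => t.2.1 == name)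

-- what A's dict looks like after the fold: first-appearance names, each with its first-maximal row
def pvSpecItems (l : List PvT) : List (String × PvT) :=
  (PySem.List.dedup (l.map (fun t => t.2.1))).map
    (fun name => (name, PySem.List.maxD (pvBucket l name) (fun t => t.2.2.1) pvJunk))

lemma pv_dedup_snoc (xs : List String) (x : String) :
    PySem.List.dedup (xs ++ [x]) =
      if x ∈ xs then PySem.List.dedup xs else PySem.List.dedup xs ++ [x] := by
  have h1 : PySem.List.dedup (xs ++ [x]) = PySem.Set.add (PySem.List.dedup xs) x := by
    simp [PySem.List.dedup, PySem.Set.ofList]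
  rw [h1, PySem.Set.add]
  by_cases h : x ∈ xs
  · simp [h]
  · simp [h]

lemma pv_max?_snoc {α : Type} (xs : List α) (x : α) (k : α → String) :
    PySem.List.max? (xs ++ [x]) k =
      some (match PySem.List.max? xs k with
            | none => x
            | some m => if k m < k x then x else m) := by
  have h : PySem.List.max? (xs ++ [x]) k =
      match PySem.List.max? xs k with
      | none => some x
      | some m => if k m < k x then some x else some m := by
    simp only [PySem.List.max?, List.foldl_append, List.foldl_cons, List.foldl_nil]
    rfl
  rw [h]
  cases hm : PySem.List.max? xs k with
  | none => rfl
  | some m => by_cases hlt : k m < k x <;> simp [hlt]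

lemma pv_max?_of_ne_nil {α : Type} (xs : List α) (k : α → String) (d : α) (h : xs ≠ []) :
    PySem.List.max? xs k = some (PySem.List.maxD xs k d) := by
  cases hm : PySem.List.max? xs k with
  | none => exact absurd ((PySem.List.max?_eq_none_iff xs k).1 hm) h
  | some m => simp [PySem.List.maxD, hm]

lemma pv_filterMap_as_map {α β : Type} (ns : List α) (g : α → Option β) (f : α → β)
    (h : ∀ a ∈ ns, g a = some (f a)) : ns.filterMap g = ns.map f := by
  induction ns with
  | nil => rfl
  | cons a t ih =>
    simp [h a (by simp), ih (fun b hb => h b (by simp [hb]))]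

lemma pv_bucket_snoc (l : List PvT) (t : PvT) (name : String) :
    pvBucket (l ++ [t]) name = pvBucket l name ++ (if t.2.1 = name then [t] else []) := by
  by_cases h : t.2.1 = name <;> simp [pvBucket, List.filter_append, h]

lemma pv_bucket_ne_nil (l : List PvT) (name : String) (h : name ∈ l.map (fun t => t.2.1)) :
    pvBucket l name ≠ [] := by
  obtain ⟨t, ht, hn⟩ := List.mem_map.1 h
  intro hnil
  have : t ∈ pvBucket l name := List.mem_filter.2 ⟨ht, by simp [hn]⟩
  simp [hnil] at this

lemma pv_maxD_snoc {α : Type} (xs : List α) (x : α) (k : α → String) (d : α) :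
    PySem.List.maxD (xs ++ [x]) k d =
      match PySem.List.max? xs k with
      | none => x
      | some m => if k m < k x then x else m := by
  rw [PySem.List.maxD, pv_max?_snoc]
  rfl

lemma pv_bucket_nil_of_fresh (l : List PvT) (t : PvT) (h : t.2.1 ∉ l.map (fun u => u.2.1)) :
    pvBucket l t.2.1 = [] := by
  rw [pvBucket, List.filter_eq_nil_iff]
  intro u hu
  simp only [beq_iff_eq]
  intro he
  exact h (List.mem_map.2 ⟨u, hu, he⟩)

lemma pv_items (l : List PvT) :
    (l.foldl pvStepA PySem.Dict.empty).items = pvSpecItems l := by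
  induction l using List.reverseRecOn with
  | nil => rfl
  | append_singleton l t ih =>
    rw [List.foldl_append, List.foldl_cons, List.foldl_nil]
    have hkeys : (l.foldl pvStepA PySem.Dict.empty).keys
        = PySem.List.dedup (l.map (fun u => u.2.1)) := by
      show ((l.foldl pvStepA PySem.Dict.empty).items).map (fun p => p.1) = _
      rw [ih, pvSpecItems, List.map_map]
      simp [Function.comp_def]
    have hnd : (l.foldl pvStepA PySem.Dict.empty).keys.Nodup := by
      rw [hkeys]; exact PySem.List.nodup_dedup _
    have hcont : (l.foldl pvStepA PySem.Dict.empty).contains t.2.1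
        = decide (t.2.1 ∈ l.map (fun u => u.2.1)) := by
      rw [PySem.Dict.contains_eq_decide_mem_keys, hkeys]
      simp only [decide_eq_decide]
      exact PySem.List.mem_dedup _ _
    have hnames : PySem.List.dedup ((l ++ [t]).map (fun u => u.2.1))
        = (if t.2.1 ∈ l.map (fun u => u.2.1) then PySem.List.dedup (l.map (fun u => u.2.1))
           else PySem.List.dedup (l.map (fun u => u.2.1)) ++ [t.2.1]) := by
      rw [List.map_append, List.map_cons, List.map_nil, pv_dedup_snoc]
    by_cases h : t.2.1 ∈ l.map (fun u => u.2.1)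
    · -- the name is already in the dict
      have hmem : (t.2.1, PySem.List.maxD (pvBucket l t.2.1) (fun u => u.2.2.1) pvJunk)
          ∈ (l.foldl pvStepA PySem.Dict.empty).items := by
        rw [ih, pvSpecItems]
        exact List.mem_map.2 ⟨t.2.1, (PySem.List.mem_dedup _ _).2 h, rfl⟩
      have hget : ∀ d0, (l.foldl pvStepA PySem.Dict.empty).getD t.2.1 d0
          = PySem.List.maxD (pvBucket l t.2.1) (fun u => u.2.2.1) pvJunk :=
        PySem.Dict.getD_of_mem_items _ hmem hnd
      have hsome : PySem.List.max? (pvBucket l t.2.1) (fun u => u.2.2.1)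
          = some (PySem.List.maxD (pvBucket l t.2.1) (fun u => u.2.2.1) pvJunk) :=
        pv_max?_of_ne_nil _ _ _ (pv_bucket_ne_nil l t.2.1 h)
      rw [pvStepA, hcont, hget]
      simp only [h, decide_true, Bool.not_true, Bool.false_or]
      by_cases hlt : (PySem.List.maxD (pvBucket l t.2.1) (fun u => u.2.2.1) pvJunk).2.2.1 < t.2.2.1
      · rw [if_pos (by simpa using hlt)]
        rw [PySem.Dict.items_insert_of_contains _ _ (by rw [hcont]; simp [h])]
        rw [ih, pvSpecItems, pvSpecItems, hnames, if_pos h, List.map_map]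
        apply List.map_congr_left
        intro name hn
        by_cases he : name = t.2.1
        · subst he
          simp only [Function.comp_apply, beq_self_eq_true, if_pos]
          rw [pv_bucket_snoc, if_pos rfl, pv_maxD_snoc, hsome]
          simp [hlt]
        · have : t.2.1 ≠ name := fun he' => he he'.symm
          simp only [Function.comp_apply, beq_iff_eq, if_neg he]
          rw [pv_bucket_snoc, if_neg this, List.append_nil]
      · rw [if_neg (by simpa using hlt)]
        rw [ih, pvSpecItems, pvSpecItems, hnames, if_pos h]
        apply List.map_congr_left
        intro name hn
        by_cases he : name = t.2.1
        · subst he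
          rw [pv_bucket_snoc, if_pos rfl, pv_maxD_snoc, hsome]
          simp [hlt]
        · have : t.2.1 ≠ name := fun he' => he he'.symm
          rw [pv_bucket_snoc, if_neg this, List.append_nil]
    · -- a fresh name: the insert appends
      rw [pvStepA, hcont]
      rw [if_pos (by simp [h])]
      rw [PySem.Dict.items_insert_of_not_contains _ _ (by rw [hcont]; simp [h])]
      rw [ih, pvSpecItems, pvSpecItems, hnames, if_neg h, List.map_append]
      congr 1
      · apply List.map_congr_left
        intro name hn
        have hne : t.2.1 ≠ name := by
          intro he
          exact h (he ▸ (PySem.List.mem_dedup _ _).1 hn)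
        rw [pv_bucket_snoc, if_neg hne, List.append_nil]
      · rw [List.map_cons, List.map_nil]
        rw [pv_bucket_snoc, if_pos rfl, pv_bucket_nil_of_fresh l t h, List.nil_append]
        simp [PySem.List.maxD, PySem.List.max?]

lemma pv_final (tracks : List PvT) :
    (tracks.foldl pvStepA PySem.Dict.empty).values =
      (PySem.List.dedup (tracks.map (fun t => t.2.1))).filterMap
        (fun name => PySem.List.max? (tracks.filter (fun t => t.2.1 == name)) (fun t => t.2.2.1)) := by
  have hmap : (tracks.foldl pvStepA PySem.Dict.empty).values =
      (PySem.List.dedup (tracks.map (fun t => t.2.1))).map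
        (fun name => PySem.List.maxD (pvBucket tracks name) (fun t => t.2.2.1) pvJunk) := by
    show ((tracks.foldl pvStepA PySem.Dict.empty).items).map (fun p => p.2) = _
    rw [pv_items, pvSpecItems, List.map_map]
    rfl
  rw [hmap]
  refine (pv_filterMap_as_map _ _ _ ?_).symm
  intro name hn
  exact pv_max?_of_ne_nil _ _ _
    (pv_bucket_ne_nil tracks name ((PySem.List.mem_dedup _ _).1 hn))

-- ===== VERDICT (by name: the statement is the Claim_ definition above) =====
theorem deduplicate_track_list_spec : Claim_equal_deduplicate_track_list := by
  intro tracks _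
  show PySem.List.sorted ((tracks.foldl pvStepA PySem.Dict.empty).values) (fun x => x.2.2.1) false =
      PySem.List.sorted ((PySem.List.dedup (tracks.map (fun t => t.2.1))).filterMap
        (fun name => PySem.List.max? (tracks.filter (fun t => t.2.1 == name)) (fun t => t.2.2.1)))
        (fun x => x.2.2.1) false
  rw [pv_final]
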